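-- pv_equiv track=rewrite | github.com/Ashwini012-hub/demoPipelineProject | practice/list_order_check.py | list_order
-- ===== SOURCE A (Python) =====
-- def list_order(lst):
--     if len(lst) < 2:
--         return "Either Ascending or Descending"
--     if all(lst[i] <= lst[i + 1] for i in range(len(lst) - 1)):
--         return "Ascending"
--     elif all(lst[i] >= lst[i + 1] for i in range(len(lst) - 1)):
--         return "Descending"
--     else:
--         return "Unordered"
-- ===== SOURCE B (Python) =====
-- def list_order(lst):
--     if len(lst) < 2:
--         return "Either Ascending or Descending"
--     if lst == sorted(lst):
--         return "Ascending"
--     if lst == sorted(lst, reverse=True):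
--         return "Descending"
--     return "Unordered"
-- ===== Notes on version B (the rewrite author's own statement) =====
-- stated objective: idiomatic
-- what changed: Replaces the two pairwise all(...) index scans with comparing the list against sorted(lst) and sorted(lst, reverse=True).
import Mathlib
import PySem

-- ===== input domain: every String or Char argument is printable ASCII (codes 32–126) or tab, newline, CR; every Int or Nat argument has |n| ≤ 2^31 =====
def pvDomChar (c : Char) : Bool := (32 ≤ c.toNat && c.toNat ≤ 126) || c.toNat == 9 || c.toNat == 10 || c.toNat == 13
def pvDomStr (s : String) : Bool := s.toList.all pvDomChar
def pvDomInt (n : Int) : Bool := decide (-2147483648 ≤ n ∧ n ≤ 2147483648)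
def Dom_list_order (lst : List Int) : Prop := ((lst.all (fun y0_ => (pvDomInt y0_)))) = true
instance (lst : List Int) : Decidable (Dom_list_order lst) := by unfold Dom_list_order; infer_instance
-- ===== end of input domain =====

-- B replaces A's two index-based all(...) scans with comparing the list against sorted(lst)
-- and sorted(lst, reverse=True); objective: idiomatic (not faster).

-- ===== PORT A =====
def list_order (lst : List Int) : String :=
  if lst.length < 2 then "Either Ascending or Descending"
  else if (PySem.List.pyRange 0 ((lst.length : Int) - 1)).all
      (fun i => decide (PySem.List.pyGetD lst i 0 ≤ PySem.List.pyGetD lst (i + 1) 0)) then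
    "Ascending"
  else if (PySem.List.pyRange 0 ((lst.length : Int) - 1)).all
      (fun i => decide (PySem.List.pyGetD lst i 0 ≥ PySem.List.pyGetD lst (i + 1) 0)) then
    "Descending"
  else "Unordered"

-- ===== PORT B =====
def list_order_alt (lst : List Int) : String :=
  if lst.length < 2 then "Either Ascending or Descending"
  else if lst = PySem.List.sorted lst (fun x => x) then "Ascending"
  else if lst = PySem.List.sorted lst (fun x => x) true then "Descending"
  else "Unordered"

-- ===== PRECONDITION & SPEC =====
def Spec_list_order (lst : List Int) (out : String) : Prop := out = list_order_alt lst
instance (lst : List Int) (out : String) : Decidable (Spec_list_order lst out) := by unfold Spec_list_order; infer_instance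

-- ===== CLAIM (what is proved, stated in full; the proofs are below) =====
def Claim_equal_list_order : Prop := ∀ (lst : List Int), Dom_list_order lst → Spec_list_order lst (list_order lst)

-- ===== LEMMAS AND PROOFS =====

-- A's adjacent-pair scan over range(len-1) is exactly pairwise order of the list.
theorem scan_iff_pairwise (lst : List Int) (r : Int → Int → Prop) [DecidableRel r]
    (htrans : ∀ a b c : Int, r a b → r b c → r a c) :
    ((PySem.List.pyRange 0 ((lst.length : Int) - 1)).all
      (fun i => decide (r (PySem.List.pyGetD lst i 0) (PySem.List.pyGetD lst (i + 1) 0))) = true)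
    ↔ List.Pairwise r lst := by
  rcases Nat.eq_zero_or_pos lst.length with h0 | hpos
  · rw [List.length_eq_zero_iff] at h0
    subst h0
    simp [show ((0 : Int) - 1) = (-1 : Int) from rfl]
  · have hc : ((lst.length : Int) - 1) = ((lst.length - 1 : Nat) : Int) := by omega
    haveI : IsTrans Int r := ⟨htrans⟩
    rw [hc, PySem.List.pyRange_zero_natCast, ← List.isChain_iff_pairwise,
        List.isChain_iff_getElem]
    simp only [List.all_map, List.all_eq_true, List.mem_range, Function.comp_apply,
      decide_eq_true_eq]
    constructor
    · intro h i hi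
      have hk : i < lst.length - 1 := by omega
      have := h i hk
      rwa [show ((i : Int) + 1) = ((i + 1 : Nat) : Int) by push_cast; ring,
           PySem.List.pyGetD_natCast, PySem.List.pyGetD_natCast,
           List.getD_eq_getElem lst 0 (by omega), List.getD_eq_getElem lst 0 (by omega)] at this
    · intro h k hk
      have := h k (by omega)
      rwa [show ((k : Int) + 1) = ((k + 1 : Nat) : Int) by push_cast; ring,
           PySem.List.pyGetD_natCast, PySem.List.pyGetD_natCast,
           List.getD_eq_getElem lst 0 (by omega), List.getD_eq_getElem lst 0 (by omega)]

-- B's "lst == sorted(lst)" test is exactly pairwise ≤.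
theorem eq_sorted_iff (lst : List Int) :
    (lst = PySem.List.sorted lst (fun x => x)) ↔ List.Pairwise (· ≤ ·) lst := by
  constructor
  · intro h
    have := PySem.List.sorted_pairwise lst (fun x => x)
    rw [← h] at this
    exact this
  · intro h
    exact (PySem.List.sorted_eq_self_of_pairwise lst (fun x => x) h).symm

-- B's "lst == sorted(lst, reverse=True)" test is exactly pairwise ≥.
theorem eq_sorted_rev_iff (lst : List Int) :
    (lst = PySem.List.sorted lst (fun x => x) true) ↔ List.Pairwise (fun a b : Int => a ≥ b) lst := by
  constructor
  · intro h
    have := PySem.List.sorted_pairwise_rev lst (fun x => x)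
    rw [← h] at this
    exact this
  · intro h
    exact (PySem.List.sorted_rev_eq_self_of_pairwise lst (fun x => x) h).symm

-- ===== VERDICT (by name: the statement is the Claim_ definition above) =====
theorem list_order_spec : Claim_equal_list_order := by
  intro lst _
  unfold Spec_list_order list_order list_order_alt
  by_cases hlen : lst.length < 2
  · simp [hlen]
  · simp only [hlen, if_false]
    by_cases ha : List.Pairwise (fun a b : Int => a ≤ b) lst
    · rw [if_pos ((scan_iff_pairwise lst (fun a b => a ≤ b) (fun _ _ _ => le_trans)).mpr ha),
          if_pos ((eq_sorted_iff lst).mpr ha)]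
    · rw [if_neg (fun h => ha ((scan_iff_pairwise lst (fun a b => a ≤ b) (fun _ _ _ => le_trans)).mp h)),
          if_neg (fun h => ha ((eq_sorted_iff lst).mp h))]
      by_cases hd : List.Pairwise (fun a b : Int => a ≥ b) lst
      · rw [if_pos ((scan_iff_pairwise lst (fun a b => a ≥ b) (fun _ _ _ h1 h2 => le_trans h2 h1)).mpr hd),
            if_pos ((eq_sorted_rev_iff lst).mpr hd)]
      · rw [if_neg (fun h => hd ((scan_iff_pairwise lst (fun a b => a ≥ b) (fun _ _ _ h1 h2 => le_trans h2 h1)).mp h)),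
            if_neg (fun h => hd ((eq_sorted_rev_iff lst).mp h))]
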